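-- pv_equiv track=rewrite | github.com/arthurbosquetti/Kattis-Problems | Playfair Cipher.py | digraph_generator
-- ===== SOURCE A (Python) =====
-- def digraph_generator(word):
--     if len(word) == 1:
--         return word + "X"
--     if word == "":
--         return ""
--     else:
--         if word[0] == word[1]:
--             return word[0] + "X" + digraph_generator(word[1:])
--         else:
--             return word[0] + word[1] + digraph_generator(word[2:])
-- ===== SOURCE B (Python) =====
-- def digraph_generator(word):
--     res = []
--     i = 0
--     n = len(word)
--     while i < n:
--         if i == n - 1:
--             res.append(word[i] + "X")
--             i += 1
--         elif word[i] == word[i + 1]: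
--             res.append(word[i] + "X")
--             i += 1
--         else:
--             res.append(word[i:i + 2])
--             i += 2
--     return "".join(res)
-- ===== Notes on version B (the rewrite author's own statement) =====
-- stated objective: faster
-- what changed: Replaced tail recursion on string suffixes (O(n) slices per step and unbounded recursion depth) by a single iterative indexed pass appending digraph chunks to a result list joined once at the end.
import Mathlib
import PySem

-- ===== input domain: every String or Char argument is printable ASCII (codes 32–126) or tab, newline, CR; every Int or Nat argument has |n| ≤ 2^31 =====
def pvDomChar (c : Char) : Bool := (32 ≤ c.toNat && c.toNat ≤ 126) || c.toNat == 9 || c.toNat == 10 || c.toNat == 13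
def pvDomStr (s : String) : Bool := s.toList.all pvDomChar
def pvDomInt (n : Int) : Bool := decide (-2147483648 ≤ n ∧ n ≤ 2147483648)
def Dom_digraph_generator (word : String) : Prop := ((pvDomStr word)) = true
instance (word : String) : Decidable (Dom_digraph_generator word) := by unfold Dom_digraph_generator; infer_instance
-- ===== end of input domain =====

-- B replaces A's suffix recursion by one iterative indexed pass collecting digraphs into a list joined at the end.

-- ===== PORT A =====
-- A's recursion, char by char: len==1 → word+"X"; "" → ""; doubled head → head+"X"+rec(tail); else first two + rec(rest)
def pvAGo : List Char → List Char
  | [c] => [c, 'X']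
  | [] => []
  | a :: b :: rest => if a == b then a :: 'X' :: pvAGo (b :: rest) else a :: b :: pvAGo rest

def digraph_generator (word : String) : String := String.ofList (pvAGo word.toList)

-- ===== PORT B =====
-- the while-loop of Source B: index i, result list of digraph chunks, joined once at the end
def pvBLoop (cs : List Char) : Nat → Nat → List (List Char) → List (List Char)
  | 0, _, acc => acc   -- fuel guard only; never reached from the initial fuel cs.length
  | fuel + 1, i, acc =>
    if i < cs.length then
      if i = cs.length - 1 then
        pvBLoop cs fuel (i + 1) (acc ++ [[cs.getD i ' ', 'X']])
      else if cs.getD i ' ' == cs.getD (i + 1) ' ' then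
        pvBLoop cs fuel (i + 1) (acc ++ [[cs.getD i ' ', 'X']])
      else
        pvBLoop cs fuel (i + 2) (acc ++ [[cs.getD i ' ', cs.getD (i + 1) ' ']])
    else acc

def digraph_generator_alt (word : String) : String :=
  String.ofList (pvBLoop word.toList word.toList.length 0 []).flatten

-- ===== PRECONDITION & SPEC =====
def Spec_digraph_generator (word : String) (out : String) : Prop := out = digraph_generator_alt word
instance (word : String) (out : String) : Decidable (Spec_digraph_generator word out) := by unfold Spec_digraph_generator; infer_instance

-- ===== CLAIM (what is proved, stated in full; the proofs are below) =====
def Claim_equal_digraph_generator : Prop := ∀ (word : String), Dom_digraph_generator word → Spec_digraph_generator word (digraph_generator word)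

-- ===== LEMMAS AND PROOFS =====

lemma pvAGo_single (a : Char) : pvAGo [a] = [a, 'X'] := rfl

lemma pvAGo_eq_cons (a b : Char) (r : List Char) (hab : a = b) :
    pvAGo (a :: b :: r) = a :: 'X' :: pvAGo (b :: r) := by simp [pvAGo, hab]

lemma pvAGo_ne_cons (a b : Char) (r : List Char) (hab : ¬ a = b) :
    pvAGo (a :: b :: r) = a :: b :: pvAGo r := by simp [pvAGo, hab]

lemma pvBLoop_spec (fuel : Nat) : ∀ (cs : List Char) (i : Nat) (acc : List (List Char)),
    cs.length - i ≤ fuel → (pvBLoop cs fuel i acc).flatten = acc.flatten ++ pvAGo (cs.drop i) := by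
  induction fuel with
  | zero =>
    intro cs i acc hk
    have hd : cs.drop i = [] := List.drop_eq_nil_of_le (by omega)
    simp [pvBLoop, hd, pvAGo]
  | succ fuel ih =>
    intro cs i acc hk
    rw [pvBLoop]
    by_cases h : i < cs.length
    · rw [if_pos h]
      have hd : cs.drop i = cs[i] :: cs.drop (i + 1) := List.drop_eq_getElem_cons h
      by_cases hlast : i = cs.length - 1
      · rw [if_pos hlast, ih _ _ _ (by omega)]
        have h2 : cs.drop (i + 1) = [] := List.drop_eq_nil_of_le (by omega)
        rw [hd, h2, pvAGo_single]
        simp [pvAGo, List.getD, List.getElem?_eq_getElem h]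
      · have h1 : i + 1 < cs.length := by omega
        have hd2 : cs.drop (i + 1) = cs[i + 1] :: cs.drop (i + 2) := List.drop_eq_getElem_cons h1
        rw [if_neg hlast]
        by_cases heq : (cs.getD i ' ' == cs.getD (i + 1) ' ') = true
        · have heq' : cs[i] = cs[i + 1] := by
            rw [List.getD_eq_getElem _ _ h, List.getD_eq_getElem _ _ h1] at heq
            exact beq_iff_eq.mp heq
          rw [if_pos heq, ih _ _ _ (by omega), hd, hd2, pvAGo_eq_cons _ _ _ heq']
          simp [List.getD, List.getElem?_eq_getElem h]
        · have hne' : ¬ cs[i] = cs[i + 1] := by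
            intro hc
            apply heq
            rw [List.getD_eq_getElem _ _ h, List.getD_eq_getElem _ _ h1]
            exact beq_iff_eq.mpr hc
          rw [if_neg heq, ih _ _ _ (by omega), hd, hd2, pvAGo_ne_cons _ _ _ hne']
          simp [List.getD, List.getElem?_eq_getElem h, List.getElem?_eq_getElem h1]
    · rw [if_neg h]
      have hd : cs.drop i = [] := List.drop_eq_nil_of_le (by omega)
      simp [hd, pvAGo]
-- ===== VERDICT (by name: the statement is the Claim_ definition above) =====
theorem digraph_generator_spec : Claim_equal_digraph_generator := by
  intro word _
  unfold Spec_digraph_generator digraph_generator digraph_generator_alt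
  rw [pvBLoop_spec (word.toList.length) _ _ _ (by omega)]
  simp
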